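-- pv_equiv track=rewrite | github.com/SmashingBumpkin/Python | HW4-req/program01_V03.py | wordlist_to_string
-- ===== SOURCE A (Python) =====
-- def wordlist_to_string(wordList):
--     #go through words and add them to dic, or add 1 to count in dic
--     #get highest counts from dictionary
--     #get earliest letter from highest counts
--     #append letter to string
--     newWordList = ["a"]
--     output = ""
--     posn = 0
--     while len(newWordList) > 0:
--         newWordList = []
--         wordDic = {}
--         for wordSub in wordList:
--             for word in wordSub:
--                 try:
--                     letter = word[posn]
--                 except IndexError:
--                     continue
--                 newWordList.append([word])
--                 wordDic[letter] = wordDic.get(letter,0) + 1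
--         wordList = newWordList
--         try:
--             maxCount = max(wordDic.values())
--         except ValueError:
--             break
--         output += min([key for key, value in wordDic.items() if value == maxCount])
--         posn += 1
--     return output
-- ===== SOURCE B (Python) =====
-- def wordlist_to_string(wordList):
--     # Flatten once; per column sort the letters and scan runs: in a sorted
--     # column the first run of maximal length is the smallest most-frequent
--     # letter, so no counting dictionary is needed at all.
--     words = [w for sub in wordList for w in sub]
--     out = []
--     c = 0
--     while True:
--         col = sorted(w[c] for w in words if len(w) > c)
--         if not col:
--             break
--         best = col[0]
--         best_run = 0
--         i = 0
--         n = len(col)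
--         while i < n:
--             j = i
--             while j < n and col[j] == col[i]:
--                 j += 1
--             if j - i > best_run:
--                 best_run = j - i
--                 best = col[i]
--             i = j
--         out.append(best)
--         c += 1
--     return "".join(out)
-- ===== Notes on version B (the rewrite author's own statement) =====
-- stated objective: alternative
-- what changed: B flattens the nested list once and, per column, SORTS the column's letters and scans runs of equal letters (first maximal run in sorted order = smallest most-frequent letter), replacing A's dictionary counting, survivor-list rebuilding and exception-driven control flow entirely — no dict is built at all.
import Mathlib
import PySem

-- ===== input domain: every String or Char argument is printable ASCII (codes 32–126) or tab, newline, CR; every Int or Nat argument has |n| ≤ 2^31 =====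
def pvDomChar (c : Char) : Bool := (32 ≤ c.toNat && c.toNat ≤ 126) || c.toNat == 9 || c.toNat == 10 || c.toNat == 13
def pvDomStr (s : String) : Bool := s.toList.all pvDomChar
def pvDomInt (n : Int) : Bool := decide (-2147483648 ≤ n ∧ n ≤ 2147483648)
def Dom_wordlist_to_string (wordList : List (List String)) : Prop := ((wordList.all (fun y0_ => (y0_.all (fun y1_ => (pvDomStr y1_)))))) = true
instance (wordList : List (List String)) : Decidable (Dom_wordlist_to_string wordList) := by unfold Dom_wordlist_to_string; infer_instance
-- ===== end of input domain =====

-- B flattens the word list once and, per column, sorts the column's letters and scans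
-- runs of equal letters (in sorted order the first maximal run starts at the smallest
-- most-frequent letter), replacing A's dict counting and survivor-list rebuilding.

-- ===== PORT A =====
-- one iteration of A's while-loop body: the nested for-loops building newWordList and wordDic
def pvStepA (wordList : List (List String)) (posn : Int) :
    List (List String) × PySem.Dict Char Int :=
  wordList.foldl
    (fun st wordSub =>
      wordSub.foldl
        (fun st word =>
          match PySem.Str.pyGet? word posn with
          | none => st          -- IndexError: continue
          | some letter => (st.1 ++ [[word]], st.2.insert letter (st.2.getD letter 0 + 1)))
        st)
    ([], PySem.Dict.empty)

-- A's while-loop; the fuel (max word length + 1) is a totality guard only: the loop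
-- breaks (dict empty) as soon as posn reaches the longest word's length.
def pvLoopA : Nat → List (List String) → String → Int → String
  | 0, _, output, _ => output
  | fuel+1, wordList, output, posn =>
    let st := pvStepA wordList posn
    match PySem.List.max? (PySem.Dict.values st.2) (fun v => v) with
    | none => output            -- ValueError: break
    | some maxCount =>
      match PySem.List.min?
          (((PySem.Dict.items st.2).filter (fun kv => kv.2 == maxCount)).map Prod.fst)
          (fun k => k) with
      | none => output          -- unreachable: the dict is nonempty here
      | some ch => pvLoopA fuel st.1 (output ++ String.singleton ch) (posn + 1)

def wordlist_to_string (wordList : List (List String)) : String :=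
  pvLoopA ((((wordList.flatMap id).map (fun w => w.toList.length)).foldl max 0) + 1)
    wordList "" 0

-- ===== PORT B =====
-- B's inner run-scan: i/j index loop over the sorted column, transcribed as the
-- structural recursion on runs (takeWhile/dropWhile = the inner 'while col[j] == col[i]').
def pvRunScan : List Char → Char → Nat → Char
  | [], best, _ => best
  | c :: rest, best, bestRun =>
    if bestRun < (rest.takeWhile (fun x => x == c)).length + 1 then
      pvRunScan (rest.dropWhile (fun x => x == c)) c
        ((rest.takeWhile (fun x => x == c)).length + 1)
    else
      pvRunScan (rest.dropWhile (fun x => x == c)) best bestRun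
termination_by l => l.length
decreasing_by
  · exact Nat.lt_succ_of_le (List.length_dropWhile_le _ _)
  · exact Nat.lt_succ_of_le (List.length_dropWhile_le _ _)

-- B's outer 'while True' loop; the fuel (max word length + 1) is a totality guard only:
-- the loop breaks as soon as the column c has no letters.
def pvLoopB : Nat → List String → Nat → List Char → List Char
  | 0, _, _, out => out
  | fuel+1, words, c, out =>
    let col := PySem.List.sorted
      (words.filterMap (fun w => if c < w.toList.length then w.toList[c]? else none))
      (fun x => x) false
    match col with
    | [] => out                 -- if not col: break
    | c0 :: _ => pvLoopB fuel words (c + 1) (out ++ [pvRunScan col c0 0])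

def wordlist_to_string_alt (wordList : List (List String)) : String :=
  let words := wordList.flatMap id
  String.ofList
    (pvLoopB (((words.map (fun w => w.toList.length)).foldl max 0) + 1) words 0 [])

-- ===== PRECONDITION & SPEC =====
def Spec_wordlist_to_string (wordList : List (List String)) (out : String) : Prop := out = wordlist_to_string_alt wordList
instance (wordList : List (List String)) (out : String) : Decidable (Spec_wordlist_to_string wordList out) := by unfold Spec_wordlist_to_string; infer_instance

-- ===== CLAIM (what is proved, stated in full; the proofs are below) =====
def Claim_equal_wordlist_to_string : Prop := ∀ (wordList : List (List String)), Dom_wordlist_to_string wordList → Spec_wordlist_to_string wordList (wordlist_to_string wordList)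

-- ===== LEMMAS AND PROOFS =====

-- proof-side vocabulary
def pvBump (d : PySem.Dict Char Int) (ch : Char) : PySem.Dict Char Int :=
  d.insert ch (d.getD ch 0 + 1)

def pvLetters (ws : List String) (posn : Int) : List Char :=
  ws.filterMap (fun w => PySem.Str.pyGet? w posn)

def pvPick (d : PySem.Dict Char Int) : Option Char :=
  match PySem.List.max? (PySem.Dict.values d) (fun v => v) with
  | none => none
  | some m =>
    PySem.List.min? (((PySem.Dict.items d).filter (fun kv => kv.2 == m)).map Prod.fst)
      (fun k => k)

def pvF (ws : List String) (c : Nat) : List Char :=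
  (pvPick ((pvLetters ws (c : Int)).foldl pvBump PySem.Dict.empty)).toList

-- 'ch is the smallest letter of maximal multiplicity in ls' — the value both programs pick
def pvBest (ls : List Char) (ch : Char) : Prop :=
  ch ∈ ls ∧ (∀ x ∈ ls, ls.count x ≤ ls.count ch) ∧
    (∀ x ∈ ls, ls.count x = ls.count ch → ch ≤ x)

-- B's per-column result as a function of the column index
def pvG (ws : List String) (c : Nat) : List Char :=
  match PySem.List.sorted (pvLetters ws (c : Int)) (fun x => x) false with
  | [] => []
  | c0 :: t => [pvRunScan (c0 :: t) c0 0]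

lemma pvBest_unique (ls : List Char) (a b : Char) (ha : pvBest ls a) (hb : pvBest ls b) :
    a = b := by
  obtain ⟨hma, hmax_a, hmin_a⟩ := ha
  obtain ⟨hmb, hmax_b, hmin_b⟩ := hb
  have h1 : ls.count a = ls.count b :=
    le_antisymm (hmax_b a hma) (hmax_a b hmb)
  exact le_antisymm (hmin_a b hmb h1.symm) (hmin_b a hma h1)

lemma pvBest_perm (ls ls' : List Char) (h : ls.Perm ls') (ch : Char) (hb : pvBest ls ch) :
    pvBest ls' ch := by
  obtain ⟨hm, hmax, hmin⟩ := hb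
  refine ⟨h.mem_iff.mp hm, ?_, ?_⟩
  · intro x hx
    rw [← h.count_eq, ← h.count_eq]
    exact hmax x (h.mem_iff.mpr hx)
  · intro x hx he
    rw [← h.count_eq, ← h.count_eq] at he
    exact hmin x (h.mem_iff.mpr hx) he

-- A's dict pick returns the smallest most-frequent letter
lemma pvPick_best (ls : List Char) (ch : Char)
    (h : pvPick (ls.foldl pvBump PySem.Dict.empty) = some ch) : pvBest ls ch := by
  have hd : ls.foldl pvBump PySem.Dict.empty = PySem.Dict.counter ls := rfl
  rw [hd] at h
  unfold pvPick at h
  have hitems : (PySem.Dict.counter ls).items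
      = (PySem.Set.ofList ls).map (fun k => (k, (ls.count k : Int))) :=
    PySem.Dict.items_counter ls
  cases hmax : PySem.List.max? (PySem.Dict.values (PySem.Dict.counter ls)) (fun v => v) with
  | none => rw [hmax] at h; exact absurd h (by simp)
  | some m =>
    rw [hmax] at h
    -- ch is a key with count ch = m
    have hchmem := PySem.List.min?_mem h
    obtain ⟨kv, hkvf, hkv1⟩ := List.mem_map.mp hchmem
    have hkvmem := (List.mem_filter.mp hkvf).1
    have hkveq : (kv.2 == m) = true := (List.mem_filter.mp hkvf).2
    rw [hitems] at hkvmem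
    obtain ⟨k, hks, hkeq⟩ := List.mem_map.mp hkvmem
    have hkls : k ∈ ls := (PySem.Set.mem_ofList _ _).mp hks
    have hch_k : ch = k := by rw [← hkv1, ← hkeq]
    have hcnt : (ls.count ch : Int) = m := by
      have : kv.2 = m := by simpa using hkveq
      rw [hch_k, ← this, ← hkeq]
    -- every count is ≤ m
    have hmaxall : ∀ x ∈ ls, (ls.count x : Int) ≤ m := by
      intro x hx
      have hxv : (ls.count x : Int) ∈ PySem.Dict.values (PySem.Dict.counter ls) := by
        unfold PySem.Dict.values
        apply List.mem_map.mpr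
        refine ⟨(x, (ls.count x : Int)), ?_, rfl⟩
        rw [hitems]
        exact List.mem_map.mpr ⟨x, (PySem.Set.mem_ofList _ _).mpr hx, rfl⟩
      exact PySem.List.max?_isMax hmax _ hxv
    refine ⟨hch_k ▸ hkls, ?_, ?_⟩
    · intro x hx
      have := hmaxall x hx
      rw [← hcnt] at this
      exact_mod_cast this
    · intro x hx hxc
      have hxm : ((ls.count x : Int) == m) = true := by
        rw [hxc]
        simp [hcnt]
      have hxf : x ∈ (((PySem.Dict.counter ls).items.filter
          (fun kv => kv.2 == m)).map Prod.fst) := by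
        apply List.mem_map.mpr
        refine ⟨(x, (ls.count x : Int)), List.mem_filter.mpr ⟨?_, hxm⟩, rfl⟩
        rw [hitems]
        exact List.mem_map.mpr ⟨x, (PySem.Set.mem_ofList _ _).mpr hx, rfl⟩
      exact PySem.List.min?_isMin h _ hxf

lemma pvPick_isSome (letters : List Char) (h : letters ≠ []) :
    (pvPick (letters.foldl pvBump PySem.Dict.empty)).isSome := by
  have hd : letters.foldl pvBump PySem.Dict.empty = PySem.Dict.counter letters := rfl
  rw [hd]
  unfold pvPick
  have hitems : (PySem.Dict.counter letters).items
      = (PySem.Set.ofList letters).map (fun k => (k, (letters.count k : Int))) :=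
    PySem.Dict.items_counter letters
  obtain ⟨x, hx⟩ : ∃ x, x ∈ letters := by
    cases letters with
    | nil => exact absurd rfl h
    | cons a t => exact ⟨a, List.mem_cons_self⟩
  have hxs : x ∈ PySem.Set.ofList letters := (PySem.Set.mem_ofList _ _).mpr hx
  have hmem : (x, (letters.count x : Int)) ∈ (PySem.Dict.counter letters).items := by
    rw [hitems]; exact List.mem_map.mpr ⟨x, hxs, rfl⟩
  have hvmem : (letters.count x : Int) ∈ PySem.Dict.values (PySem.Dict.counter letters) := by
    unfold PySem.Dict.values
    exact List.mem_map.mpr ⟨(x, (letters.count x : Int)), hmem, rfl⟩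
  cases hmax : PySem.List.max? (PySem.Dict.values (PySem.Dict.counter letters)) (fun v => v) with
  | none =>
    rw [PySem.List.max?_eq_none_iff] at hmax
    rw [hmax] at hvmem
    exact absurd hvmem (List.not_mem_nil)
  | some m =>
    have hm : m ∈ PySem.Dict.values (PySem.Dict.counter letters) := PySem.List.max?_mem hmax
    unfold PySem.Dict.values at hm
    obtain ⟨kv, hkv, hkv2⟩ := List.mem_map.mp hm
    have hf : kv.1 ∈ (((PySem.Dict.counter letters).items.filter
        (fun kv => kv.2 == m)).map Prod.fst) := by
      apply List.mem_map.mpr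
      exact ⟨kv, List.mem_filter.mpr ⟨hkv, by simp [hkv2]⟩, rfl⟩
    cases hmin : PySem.List.min? (((PySem.Dict.counter letters).items.filter
        (fun kv => kv.2 == m)).map Prod.fst) (fun k => k) with
    | none =>
      rw [PySem.List.min?_eq_none_iff] at hmin
      rw [hmin] at hf
      exact absurd hf (List.not_mem_nil)
    | some ch => simp [hmin]

-- the takeWhile block of a run is a replicate, and c :: rest splits into run ++ rest
lemma pvTW_rep (c : Char) (rest : List Char) :
    rest.takeWhile (fun x => x == c)
      = List.replicate (rest.takeWhile (fun x => x == c)).length c :=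
  List.eq_replicate_of_mem (fun b hb => by simpa using List.mem_takeWhile_imp hb)

lemma pvConsSplit (c : Char) (rest : List Char) :
    c :: rest
      = List.replicate ((rest.takeWhile (fun x => x == c)).length + 1) c
          ++ rest.dropWhile (fun x => x == c) := by
  rw [List.replicate_succ, List.cons_append, ← pvTW_rep, List.takeWhile_append_dropWhile]

-- after dropping the run of c, everything is strictly above c
lemma pvDW_gt (c : Char) (rest : List Char) (hpw : rest.Pairwise (· ≤ ·))
    (hge : ∀ x ∈ rest, c ≤ x) :
    ∀ x ∈ rest.dropWhile (fun x => x == c), c < x := by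
  cases hd : rest.dropWhile (fun x => x == c) with
  | nil => intro x hx; exact absurd hx (List.not_mem_nil)
  | cons d dt =>
    have hne : rest.dropWhile (fun x => x == c) ≠ [] := by rw [hd]; simp
    have h2 := List.head_dropWhile_not (fun x => x == c) hne
    have h3 : (rest.dropWhile (fun x => x == c)).head hne = d := by
      rw [List.head_eq_iff_head?_eq_some, hd]; rfl
    rw [h3] at h2
    have hdc : d ≠ c := by simpa using h2
    have hsub : (d :: dt).Sublist rest := hd ▸ List.dropWhile_sublist _
    have hcd : c < d := lt_of_le_of_ne (hge d (hsub.mem List.mem_cons_self)) (Ne.symm hdc)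
    have hpw' : (d :: dt).Pairwise (· ≤ ·) := hpw.sublist hsub
    intro x hx
    rcases List.mem_cons.mp hx with hx | hx
    · exact hx ▸ hcd
    · exact lt_of_lt_of_le hcd ((List.pairwise_cons.mp hpw').1 x hx)

lemma pvBest_replicate (k : Nat) (b : Char) (h : 1 ≤ k) :
    pvBest (List.replicate k b) b := by
  refine ⟨List.mem_replicate.mpr ⟨by omega, rfl⟩, ?_, ?_⟩
  · intro x hx
    rw [(List.mem_replicate.mp hx).2]
  · intro x hx _
    rw [(List.mem_replicate.mp hx).2]

-- padding the winner's multiset with a strictly beaten old candidate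
lemma pvBest_pad_lt (b : Char) (k : Nat) (M : List Char) (r : Char)
    (hnb : b ∉ M) (hb : pvBest M r) (hk : k < M.count r) :
    pvBest (List.replicate k b ++ M) r := by
  obtain ⟨hm, hmax, hmin⟩ := hb
  have hrb : r ≠ b := fun h => hnb (h ▸ hm)
  have hcb : M.count b = 0 := List.count_eq_zero_of_not_mem hnb
  have hcount : ∀ y : Char, (List.replicate k b ++ M).count y
      = (if b = y then k else 0) + M.count y := by
    intro y
    rw [List.count_append, List.count_replicate]
    simp [beq_iff_eq]
  have hcr : (List.replicate k b ++ M).count r = M.count r := by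
    rw [hcount, if_neg (fun h => hrb h.symm)]
    omega
  refine ⟨List.mem_append.mpr (Or.inr hm), ?_, ?_⟩
  · intro x hx
    rw [hcount, hcr]
    rcases List.mem_append.mp hx with hx | hx
    · rw [(List.mem_replicate.mp hx).2, if_pos rfl, hcb]
      omega
    · have hxb : b ≠ x := fun h => hnb (h ▸ hx)
      rw [if_neg hxb]
      have := hmax x hx
      omega
  · intro x hx he
    rw [hcount, hcr] at he
    rcases List.mem_append.mp hx with hx | hx
    · exfalso
      rw [(List.mem_replicate.mp hx).2, if_pos rfl, hcb] at he
      omega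
    · have hxb : b ≠ x := fun h => hnb (h ▸ hx)
      rw [if_neg hxb] at he
      exact hmin x hx (by omega)

-- inserting a run of c (no longer than the kept candidate's run) between winner blocks
lemma pvBest_mid (b c : Char) (k run : Nat) (dw : List Char) (r : Char)
    (hb : pvBest (List.replicate k b ++ dw) r) (h1 : 1 ≤ k) (hkr : run ≤ k)
    (hbc : b < c) (hdw : ∀ x ∈ dw, c < x) :
    pvBest (List.replicate k b ++ (List.replicate run c ++ dw)) r := by
  obtain ⟨hm, hmax, hmin⟩ := hb
  have hcb : c ≠ b := Ne.symm (ne_of_lt hbc)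
  have hcndw : c ∉ dw := fun h => lt_irrefl c (hdw c h)
  have hbndw : b ∉ dw := fun h => lt_irrefl b (lt_trans hbc (hdw b h))
  have hcnM : c ∉ List.replicate k b ++ dw := by
    intro h
    rcases List.mem_append.mp h with h | h
    · exact hcb ((List.mem_replicate.mp h).2)
    · exact hcndw h
  have hrc : r ≠ c := fun h => hcnM (h ▸ hm)
  have hcount : ∀ y : Char, (List.replicate k b ++ (List.replicate run c ++ dw)).count y
      = (if c = y then run else 0) + (List.replicate k b ++ dw).count y := by
    intro y
    rw [List.count_append, List.count_append, List.count_append, List.count_replicate,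
      List.count_replicate]
    simp only [beq_iff_eq]
    omega
  have hcr : (List.replicate k b ++ (List.replicate run c ++ dw)).count r
      = (List.replicate k b ++ dw).count r := by
    rw [hcount, if_neg (fun h => hrc h.symm)]
    omega
  have hcntb : (List.replicate k b ++ dw).count b = k := by
    rw [List.count_append, List.count_replicate, List.count_eq_zero_of_not_mem hbndw]
    simp
  have hbmem : b ∈ List.replicate k b ++ dw :=
    List.mem_append.mpr (Or.inl (List.mem_replicate.mpr ⟨by omega, rfl⟩))
  have hkler : k ≤ (List.replicate k b ++ dw).count r := by
    have := hmax b hbmem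
    omega
  refine ⟨?_, ?_, ?_⟩
  · rcases List.mem_append.mp hm with h | h
    · exact List.mem_append.mpr (Or.inl h)
    · exact List.mem_append.mpr (Or.inr (List.mem_append.mpr (Or.inr h)))
  · intro x hx
    rw [hcount, hcr]
    by_cases hxc : x = c
    · subst hxc
      rw [if_pos rfl, List.count_eq_zero_of_not_mem hcnM]
      omega
    · rw [if_neg (fun h => hxc h.symm)]
      have hxM : x ∈ List.replicate k b ++ dw := by
        rcases List.mem_append.mp hx with h | h
        · exact List.mem_append.mpr (Or.inl h)
        · rcases List.mem_append.mp h with h | h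
          · exact absurd ((List.mem_replicate.mp h).2) hxc
          · exact List.mem_append.mpr (Or.inr h)
      have := hmax x hxM
      omega
  · intro x hx he
    rw [hcount, hcr] at he
    by_cases hxc : x = c
    · -- a tie with the inserted run: then everything equals k and r ≤ b < c
      subst hxc
      rw [if_pos rfl, List.count_eq_zero_of_not_mem hcnM] at he
      have : (List.replicate k b ++ dw).count r = k := by omega
      have hrb : r ≤ b := hmin b hbmem (by omega)
      exact le_of_lt (lt_of_le_of_lt hrb hbc)
    · rw [if_neg (fun h => hxc h.symm)] at he
      have hxM : x ∈ List.replicate k b ++ dw := by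
        rcases List.mem_append.mp hx with h | h
        · exact List.mem_append.mpr (Or.inl h)
        · rcases List.mem_append.mp h with h | h
          · exact absurd ((List.mem_replicate.mp h).2) hxc
          · exact List.mem_append.mpr (Or.inr h)
      exact hmin x hxM (by omega)

-- B's run scan over a sorted tail: the invariant.  The virtual multiset
-- 'replicate bestRun best ++ l' records the scanned prefix by its winner.
lemma pvRunScan_inv (n : Nat) :
    ∀ (l : List Char) (best : Char) (bestRun : Nat), l.length ≤ n →
      l.Pairwise (· ≤ ·) → (∀ x ∈ l, best < x) → 1 ≤ bestRun →
      pvBest (List.replicate bestRun best ++ l) (pvRunScan l best bestRun) := by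
  induction n with
  | zero =>
    intro l best bestRun hlen _ _ h1
    have hleq : l = [] := List.eq_nil_of_length_eq_zero (by omega)
    subst hleq
    rw [pvRunScan, List.append_nil]
    exact pvBest_replicate _ _ h1
  | succ n ih =>
    intro l best bestRun hlen hpw hgt h1
    cases l with
    | nil =>
      rw [pvRunScan, List.append_nil]
      exact pvBest_replicate _ _ h1
    | cons c rest =>
      obtain ⟨hall, hpw'⟩ := List.pairwise_cons.mp hpw
      have hdwgt := pvDW_gt c rest hpw' hall
      have hdwpw : (rest.dropWhile (fun x => x == c)).Pairwise (· ≤ ·) :=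
        hpw'.sublist (List.dropWhile_sublist _)
      have hdwlen : (rest.dropWhile (fun x => x == c)).length ≤ n := by
        have := List.length_dropWhile_le (fun x => x == c) rest
        simp only [List.length_cons] at hlen
        omega
      have hbc : best < c := hgt c List.mem_cons_self
      rw [pvRunScan]
      split_ifs with hif
      · have hIH := ih (rest.dropWhile (fun x => x == c)) c
          ((rest.takeWhile (fun x => x == c)).length + 1) hdwlen hdwpw hdwgt (by omega)
        rw [pvConsSplit c rest]
        apply pvBest_pad_lt
        · intro h
          rcases List.mem_append.mp h with h | h
          · exact lt_irrefl best (((List.mem_replicate.mp h).2) ▸ hbc)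
          · exact lt_irrefl best (lt_trans hbc (hdwgt best h))
        · exact hIH
        · obtain ⟨hm, hmax, _⟩ := hIH
          have hcmem : c ∈ List.replicate ((rest.takeWhile (fun x => x == c)).length + 1) c
              ++ rest.dropWhile (fun x => x == c) :=
            List.mem_append.mpr (Or.inl (List.mem_replicate.mpr ⟨by omega, rfl⟩))
          have hcntc : (List.replicate ((rest.takeWhile (fun x => x == c)).length + 1) c
              ++ rest.dropWhile (fun x => x == c)).count c
              = (rest.takeWhile (fun x => x == c)).length + 1 := by
            rw [List.count_append, List.count_replicate,
              List.count_eq_zero_of_not_mem (fun h => lt_irrefl c (hdwgt c h))]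
            simp
          have := hmax c hcmem
          omega
      · have hIH := ih (rest.dropWhile (fun x => x == c)) best bestRun hdwlen hdwpw
          (fun x hx => lt_trans hbc (hdwgt x hx)) h1
        rw [pvConsSplit c rest]
        exact pvBest_mid best c bestRun ((rest.takeWhile (fun x => x == c)).length + 1)
          (rest.dropWhile (fun x => x == c)) _ hIH h1 (by omega) hbc hdwgt

-- the per-column agreement: B's sorted run scan = A's dict pick
lemma pvG_eq_pvF (ws : List String) (c : Nat) : pvG ws c = pvF ws c := by
  cases hcol : PySem.List.sorted (pvLetters ws (c : Int)) (fun x => x) false with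
  | nil =>
    have hnil : pvLetters ws (c : Int) = [] := (PySem.List.sorted_eq_nil_iff _ _ _).mp hcol
    have hG : pvG ws c = [] := by unfold pvG; rw [hcol]
    have hF : pvF ws c = [] := by unfold pvF; rw [hnil]; rfl
    rw [hG, hF]
  | cons c0 t =>
    have hne : pvLetters ws (c : Int) ≠ [] := by
      intro h
      rw [h] at hcol
      exact absurd hcol (by simp [PySem.List.sorted])
    obtain ⟨ch, hch⟩ := Option.isSome_iff_exists.mp (pvPick_isSome _ hne)
    have hbestA : pvBest (pvLetters ws (c : Int)) ch := pvPick_best _ _ hch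
    have hG : pvG ws c = [pvRunScan (c0 :: t) c0 0] := by unfold pvG; rw [hcol]
    have hpwcol : (c0 :: t).Pairwise (· ≤ ·) := by
      have := PySem.List.sorted_pairwise (xs := pvLetters ws (c : Int)) (key := fun x => x)
      rw [hcol] at this
      exact this
    obtain ⟨hall, hpw'⟩ := List.pairwise_cons.mp hpwcol
    have hdwgt := pvDW_gt c0 t hpw' hall
    have hdwpw : (t.dropWhile (fun x => x == c0)).Pairwise (· ≤ ·) :=
      hpw'.sublist (List.dropWhile_sublist _)
    have hrun : pvRunScan (c0 :: t) c0 0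
        = pvRunScan (t.dropWhile (fun x => x == c0)) c0
            ((t.takeWhile (fun x => x == c0)).length + 1) := by
      rw [pvRunScan, if_pos (by omega)]
    have hinv := pvRunScan_inv (t.dropWhile (fun x => x == c0)).length
      (t.dropWhile (fun x => x == c0)) c0 ((t.takeWhile (fun x => x == c0)).length + 1)
      le_rfl hdwpw hdwgt (by omega)
    rw [← pvConsSplit c0 t] at hinv
    have hperm : (c0 :: t).Perm (pvLetters ws (c : Int)) := by
      have := PySem.List.sorted_perm (xs := pvLetters ws (c : Int)) (key := fun x => x)
        (rev := false)
      rw [hcol] at this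
      exact this
    have hbestB := pvBest_perm _ _ hperm _ hinv
    have heq := pvBest_unique _ _ _ hbestB hbestA
    have hF : pvF ws c = [ch] := by unfold pvF; rw [hch]; rfl
    rw [hG, hF, hrun, heq]

lemma pvInner_eq (posn : Int) :
    ∀ (ws : List String) (st : List (List String) × PySem.Dict Char Int),
      ws.foldl
        (fun st word =>
          match PySem.Str.pyGet? word posn with
          | none => st
          | some letter => (st.1 ++ [[word]], st.2.insert letter (st.2.getD letter 0 + 1)))
        st
      = (st.1 ++ (ws.filter (fun w => (PySem.Str.pyGet? w posn).isSome)).map (fun w => [w]),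
         (pvLetters ws posn).foldl pvBump st.2) := by
  intro ws
  induction ws with
  | nil => intro st; simp [pvLetters]
  | cons w ws ih =>
    intro st
    cases h : PySem.Str.pyGet? w posn with
    | none =>
      simp only [List.foldl_cons, h]
      rw [ih]
      have h' : PySem.List.pyGet? w.toList posn = none := by
        simpa [PySem.Str.pyGet?] using h
      simp [pvLetters, h']
    | some l =>
      simp only [List.foldl_cons, h]
      rw [ih]
      have h' : PySem.List.pyGet? w.toList posn = some l := by
        simpa [PySem.Str.pyGet?] using h
      simp [pvLetters, h', pvBump]

lemma pvStepA_eq (L : List (List String)) (posn : Int) :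
    pvStepA L posn
      = (((L.flatMap id).filter (fun w => (PySem.Str.pyGet? w posn).isSome)).map (fun w => [w]),
         (pvLetters (L.flatMap id) posn).foldl pvBump PySem.Dict.empty) := by
  have h1 : pvStepA L posn
      = List.foldl
          (fun st word =>
            match PySem.Str.pyGet? word posn with
            | none => st
            | some letter => (st.1 ++ [[word]], st.2.insert letter (st.2.getD letter 0 + 1)))
          (([], PySem.Dict.empty) : List (List String) × PySem.Dict Char Int)
          (L.flatMap id) := by
    rw [List.foldl_flatMap]
    rfl
  rw [h1, pvInner_eq]
  rfl

lemma pvLetters_filter (ws : List String) (c k : Nat) (hk : k ≤ c) :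
    pvLetters (ws.filter (fun w => decide (k ≤ w.toList.length))) (c : Int)
      = pvLetters ws (c : Int) := by
  unfold pvLetters
  rw [List.filterMap_filter]
  apply List.filterMap_congr
  intro w _
  by_cases hw : k ≤ w.toList.length
  · rw [if_pos (decide_eq_true hw)]
  · rw [if_neg (by simpa using hw)]
    have hg : w.toList[c]? = none := List.getElem?_eq_none (by omega)
    rw [PySem.Str.pyGet?_natCast, hg]

lemma pvLetters_nil (ws : List String) (c : Nat) (h : ∀ w ∈ ws, w.toList.length ≤ c) :
    pvLetters ws (c : Int) = [] := by
  unfold pvLetters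
  apply List.filterMap_eq_nil_iff.mpr
  intro w hw
  have hg : w.toList[c]? = none := List.getElem?_eq_none (h w hw)
  simp [hg]

lemma pvColB_eq (ws : List String) (c : Nat) :
    ws.filterMap (fun w => if c < w.toList.length then w.toList[c]? else none)
      = pvLetters ws (c : Int) := by
  unfold pvLetters
  apply List.filterMap_congr
  intro w _
  by_cases hw : c < w.toList.length
  · rw [if_pos hw, PySem.Str.pyGet?_natCast]
  · rw [if_neg hw, PySem.Str.pyGet?_natCast, List.getElem?_eq_none (by omega)]

lemma pvLoopA_eq (ws0 : List String) :
    ∀ (fuel c : Nat) (L : List (List String)) (out : String),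
      L.flatMap id = ws0.filter (fun w => decide (c ≤ w.toList.length)) →
      ((ws0.map (fun w => w.toList.length)).foldl max 0) ≤ c + fuel →
      (pvLoopA fuel L out (c : Int)).toList
        = out.toList
          ++ (List.range' c (((ws0.map (fun w => w.toList.length)).foldl max 0) - c)).flatMap
               (pvF ws0) := by
  intro fuel
  induction fuel with
  | zero =>
    intro c L out hL hn
    have h0 : ((ws0.map (fun w => w.toList.length)).foldl max 0) - c = 0 := by omega
    rw [h0]
    simp [pvLoopA]
  | succ fuel ih =>
    intro c L out hL hn
    have hlet : pvLetters (L.flatMap id) (c : Int) = pvLetters ws0 (c : Int) := by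
      rw [hL]; exact pvLetters_filter ws0 c c le_rfl
    by_cases hc : c < ((ws0.map (fun w => w.toList.length)).foldl max 0)
    · -- a word of maximal length is longer than c, so this column has letters
      obtain ⟨w, hwmem, hwlen⟩ : ∃ w ∈ ws0, c < w.toList.length := by
        rcases PySem.List.foldl_max_mem (ws0.map (fun w => w.toList.length)) 0 with h0 | hmem
        · omega
        · obtain ⟨w, hw, hlen⟩ := List.mem_map.mp hmem
          exact ⟨w, hw, by omega⟩
      have hne : pvLetters ws0 (c : Int) ≠ [] := by
        intro hnil
        unfold pvLetters at hnil
        have hnone := List.filterMap_eq_nil_iff.mp hnil w hwmem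
        rw [PySem.Str.pyGet?_natCast, List.getElem?_eq_getElem hwlen] at hnone
        simp at hnone
      obtain ⟨ch, hch⟩ := Option.isSome_iff_exists.mp
        (pvPick_isSome (pvLetters ws0 (c : Int)) hne)
      have hflat : ∀ (l : List String), (l.map (fun w => [w])).flatMap id = l := by
        intro l
        induction l with
        | nil => rfl
        | cons a t iht => simp [iht]
      have hsurv : ((((L.flatMap id).filter
            (fun w => (PySem.Str.pyGet? w (c : Int)).isSome)).map (fun w => [w])).flatMap id)
          = ws0.filter (fun w => decide ((c + 1) ≤ w.toList.length)) := by
        rw [hflat, hL, List.filter_filter]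
        apply List.filter_congr
        intro w _
        rw [PySem.Str.pyGet?_natCast]
        by_cases hw : c + 1 ≤ w.toList.length
        · rw [List.getElem?_eq_getElem (by omega)]
          rw [Option.isSome_some, Bool.true_and]
          simp only [decide_eq_decide]
          omega
        · rw [List.getElem?_eq_none (by omega)]
          rw [Option.isSome_none, Bool.false_and]
          symm
          rw [decide_eq_false_iff_not]
          omega
      have hrec := ih (c + 1) _ (out ++ String.singleton ch) hsurv (by omega)
      unfold pvPick at hch
      simp only [pvLoopA]
      rw [pvStepA_eq]
      simp only []
      rw [hlet]
      cases hmax : PySem.List.max?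
          (PySem.Dict.values ((pvLetters ws0 (c : Int)).foldl pvBump PySem.Dict.empty))
          (fun v => v) with
      | none => simp [hmax] at hch
      | some m =>
        simp only [hmax] at hch
        simp only [hch]
        have hcast : (c : Int) + 1 = ((c + 1 : Nat) : Int) := by push_cast; ring
        rw [hcast, hrec]
        have hrange : List.range' c (((ws0.map (fun w => w.toList.length)).foldl max 0) - c)
            = c :: List.range' (c + 1)
                (((ws0.map (fun w => w.toList.length)).foldl max 0) - (c + 1)) := by
          have h1 : ((ws0.map (fun w => w.toList.length)).foldl max 0) - c
              = (((ws0.map (fun w => w.toList.length)).foldl max 0) - (c + 1)) + 1 := by omega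
          rw [h1, List.range'_succ]
        rw [hrange, List.flatMap_cons]
        have hFc : pvF ws0 c = [ch] := by
          unfold pvF pvPick
          simp only [hmax, hch]
          rfl
        rw [hFc]
        simp
    · -- every word is exhausted: the dict is empty and A breaks
      have hlen : ∀ w ∈ ws0, w.toList.length ≤ c := by
        intro w hw
        have hle := (PySem.List.le_foldl_max (ws0.map (fun w => w.toList.length)) 0).2
        have := hle _ (List.mem_map.mpr ⟨w, hw, rfl⟩)
        omega
      have hnil : pvLetters ws0 (c : Int) = [] := pvLetters_nil ws0 c hlen
      have h0 : ((ws0.map (fun w => w.toList.length)).foldl max 0) - c = 0 := by omega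
      simp only [pvLoopA]
      rw [pvStepA_eq]
      simp only []
      rw [hlet, hnil, h0]
      simp [PySem.Dict.values, PySem.Dict.empty, PySem.List.max?]

lemma pvLoopB_eq (ws : List String) :
    ∀ (fuel c : Nat) (out : List Char),
      ((ws.map (fun w => w.toList.length)).foldl max 0) ≤ c + fuel →
      pvLoopB fuel ws c out
        = out
          ++ (List.range' c (((ws.map (fun w => w.toList.length)).foldl max 0) - c)).flatMap
               (pvG ws) := by
  intro fuel
  induction fuel with
  | zero =>
    intro c out hn
    have h0 : ((ws.map (fun w => w.toList.length)).foldl max 0) - c = 0 := by omega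
    rw [h0]
    simp [pvLoopB]
  | succ fuel ih =>
    intro c out hn
    simp only [pvLoopB]
    rw [pvColB_eq]
    by_cases hc : c < ((ws.map (fun w => w.toList.length)).foldl max 0)
    · obtain ⟨w, hwmem, hwlen⟩ : ∃ w ∈ ws, c < w.toList.length := by
        rcases PySem.List.foldl_max_mem (ws.map (fun w => w.toList.length)) 0 with h0 | hmem
        · omega
        · obtain ⟨w, hw, hlen⟩ := List.mem_map.mp hmem
          exact ⟨w, hw, by omega⟩
      have hne : pvLetters ws (c : Int) ≠ [] := by
        intro hnil
        unfold pvLetters at hnil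
        have hnone := List.filterMap_eq_nil_iff.mp hnil w hwmem
        rw [PySem.Str.pyGet?_natCast, List.getElem?_eq_getElem hwlen] at hnone
        simp at hnone
      cases hcol : PySem.List.sorted (pvLetters ws (c : Int)) (fun x => x) false with
      | nil => exact absurd ((PySem.List.sorted_eq_nil_iff _ _ _).mp hcol) hne
      | cons c0 t =>
        dsimp only
        rw [ih (c + 1) _ (by omega)]
        have hrange : List.range' c (((ws.map (fun w => w.toList.length)).foldl max 0) - c)
            = c :: List.range' (c + 1)
                (((ws.map (fun w => w.toList.length)).foldl max 0) - (c + 1)) := by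
          have h1 : ((ws.map (fun w => w.toList.length)).foldl max 0) - c
              = (((ws.map (fun w => w.toList.length)).foldl max 0) - (c + 1)) + 1 := by omega
          rw [h1, List.range'_succ]
        rw [hrange, List.flatMap_cons]
        have hG : pvG ws c = [pvRunScan (c0 :: t) c0 0] := by
          unfold pvG
          rw [hcol]
        rw [hG]
        simp
    · have hlen : ∀ w ∈ ws, w.toList.length ≤ c := by
        intro w hw
        have hle := (PySem.List.le_foldl_max (ws.map (fun w => w.toList.length)) 0).2
        have := hle _ (List.mem_map.mpr ⟨w, hw, rfl⟩)
        omega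
      have hnil : pvLetters ws (c : Int) = [] := pvLetters_nil ws c hlen
      have h0 : ((ws.map (fun w => w.toList.length)).foldl max 0) - c = 0 := by omega
      rw [hnil, h0]
      simp [PySem.List.sorted]

-- ===== VERDICT (by name: the statement is the Claim_ definition above) =====
theorem wordlist_to_string_spec : Claim_equal_wordlist_to_string := by
  unfold Claim_equal_wordlist_to_string
  intro wl _
  unfold Spec_wordlist_to_string
  refine String.toList_inj.mp ?_
  have hA := pvLoopA_eq (wl.flatMap id)
    ((((wl.flatMap id).map (fun w => w.toList.length)).foldl max 0) + 1) 0 wl ""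
    (by symm; apply List.filter_eq_self.mpr; intro w _; simp) (by omega)
  rw [Nat.cast_zero, Nat.sub_zero] at hA
  unfold wordlist_to_string wordlist_to_string_alt
  rw [hA]
  have hB := pvLoopB_eq (wl.flatMap id)
    ((((wl.flatMap id).map (fun w => w.toList.length)).foldl max 0) + 1) 0 [] (by omega)
  rw [Nat.sub_zero] at hB
  simp only [String.toList_ofList, hB, List.nil_append]
  exact List.flatMap_congr (fun c _ => (pvG_eq_pvF (wl.flatMap id) c).symm)
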